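-- pv_equiv track=rewrite | github.com/TToJlkoBHuK/Development_UI | 5030102_30201/Лемдянов Илья Данилович/stage 1/mapping_executor.py | translate_commands_text
-- ===== SOURCE A (Python) =====
-- from typing import Dict, List, Any, Callable
--
-- def translate_commands_text(commands_text: str, mapping: Dict[str,str]) -> str:
--     out_lines: List[str] = []
--     lines = commands_text.splitlines()
--     for raw in lines:
--         stripped = raw.lstrip('\t ')
--         leading = raw[:len(raw)-len(stripped)]
--         key = stripped.strip()
--         if not key:
--             out_lines.append("")
--             continue
--         found = None
--         if key in mapping:
--             found = mapping[key]
--         else: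
--             k_norm = key.lower().replace(" ", "").replace("_","")
--             for mk, mv in mapping.items():
--                 if mk.lower().replace(" ", "").replace("_","") == k_norm:
--                     found = mv
--                     break
--         if found:
--             out_lines.append(f"{leading}{found}()")
--             out_lines.append(f"{leading}__step__()")
--         else:
--             out_lines.append(raw)
--     return "\n".join(out_lines)
-- ===== SOURCE B (Python) =====
-- def translate_commands_text(commands_text: str, mapping) -> str:
--     def norm(s):
--         return s.lower().replace(" ", "").replace("_", "")
--     norm_index = {}
--     for mk, mv in mapping.items():
--         norm_index.setdefault(norm(mk), mv)
--
--     def render(raw):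
--         stripped = raw.lstrip('\t ')
--         key = stripped.strip()
--         if not key:
--             return [""]
--         found = mapping.get(key)
--         if found is None:
--             found = norm_index.get(norm(key))
--         if found:
--             leading = raw[:len(raw) - len(stripped)]
--             return [leading + found + "()", leading + "__step__()"]
--         return [raw]
--
--     return "\n".join(s for raw in commands_text.splitlines() for s in render(raw))
-- ===== Notes on version B (the rewrite author's own statement) =====
-- stated objective: alternative
-- what changed: Builds a first-wins normalized-key dictionary once up front so each line's fallback is a single dictionary lookup instead of an inner scan over the whole mapping, and renders each line to its block of output lines, flattened into one join.
import Mathlib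
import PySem

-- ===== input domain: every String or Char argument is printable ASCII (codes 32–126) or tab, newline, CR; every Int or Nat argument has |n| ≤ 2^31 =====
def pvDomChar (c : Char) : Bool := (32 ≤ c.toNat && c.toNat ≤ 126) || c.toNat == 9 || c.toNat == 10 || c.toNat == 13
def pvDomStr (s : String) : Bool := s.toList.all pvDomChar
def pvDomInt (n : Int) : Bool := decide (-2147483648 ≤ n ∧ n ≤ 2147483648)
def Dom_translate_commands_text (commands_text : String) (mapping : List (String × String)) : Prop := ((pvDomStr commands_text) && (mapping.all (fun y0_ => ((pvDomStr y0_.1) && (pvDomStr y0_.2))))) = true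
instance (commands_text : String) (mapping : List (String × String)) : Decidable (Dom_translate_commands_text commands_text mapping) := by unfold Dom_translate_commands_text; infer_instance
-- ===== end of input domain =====

-- B precomputes a first-wins normalized-key dictionary once, replacing A's per-line
-- fallback scan over the whole mapping by one dictionary lookup (alternative algorithm;
-- not measured faster on a timing run's inputs).

-- key.lower().replace(" ", "").replace("_", "")   (shared literal normalization expression)
def pvNorm (s : String) : String :=
  PySem.Str.replace (PySem.Str.replace (PySem.Str.lower s) " " "") "_" ""

-- raw.lstrip('\t ') : exact hand port — drops leading chars belonging to the set {'\t', ' '}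
def pvLstripTabSpace (raw : String) : String :=
  String.ofList (raw.toList.dropWhile (fun c => c == '\t' || c == ' '))

-- ===== PORT A =====
-- one iteration of A's loop: the list of lines appended for this raw line
def pvLineA (d : PySem.Dict String String) (raw : String) : List String :=
  let stripped := pvLstripTabSpace raw
  let leading := PySem.Str.slice raw none (some (PySem.Str.len raw - PySem.Str.len stripped))
  let key := PySem.Str.strip stripped
  if key = "" then [""]
  else
    let found : Option String :=
      if d.contains key then d.get? key
      else
        let k_norm := pvNorm key
        d.items.findSome? (fun p => if pvNorm p.1 = k_norm then some p.2 else none)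
    match found with
    | some f => if f ≠ "" then [leading ++ f ++ "()", leading ++ "__step__()"] else [raw]
    | none => [raw]

def translate_commands_text (commands_text : String) (mapping : List (String × String)) : String :=
  let d := PySem.Dict.ofList mapping
  let lines := PySem.Str.splitlines commands_text
  let out_lines := lines.foldl (fun out raw => out ++ pvLineA d raw) []
  PySem.Str.join "\n" out_lines

-- ===== PORT B =====
-- B's render(raw): the block of output lines for one input line
def pvLineB (d nd : PySem.Dict String String) (raw : String) : List String :=
  let stripped := pvLstripTabSpace raw
  let key := PySem.Str.strip stripped
  if key = "" then [""]
  else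
    let found : Option String :=
      match d.get? key with
      | some v => some v
      | none => nd.get? (pvNorm key)
    match found with
    | some f =>
      if f ≠ "" then
        let leading := PySem.Str.slice raw none (some (PySem.Str.len raw - PySem.Str.len stripped))
        [leading ++ f ++ "()", leading ++ "__step__()"]
      else [raw]
    | none => [raw]

def translate_commands_text_alt (commands_text : String) (mapping : List (String × String)) : String :=
  let d := PySem.Dict.ofList mapping
  let nd := d.items.foldl (fun nd p => nd.setdefault (pvNorm p.1) p.2) PySem.Dict.empty
  PySem.Str.join "\n" ((PySem.Str.splitlines commands_text).flatMap (fun raw => pvLineB d nd raw))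

-- ===== PRECONDITION & SPEC =====
def Spec_translate_commands_text (commands_text : String) (mapping : List (String × String)) (out : String) : Prop := out = translate_commands_text_alt commands_text mapping
instance (commands_text : String) (mapping : List (String × String)) (out : String) : Decidable (Spec_translate_commands_text commands_text mapping out) := by unfold Spec_translate_commands_text; infer_instance

-- ===== CLAIM (what is proved, stated in full; the proofs are below) =====
def Claim_equal_translate_commands_text : Prop := ∀ (commands_text : String) (mapping : List (String × String)), Dom_translate_commands_text commands_text mapping → Spec_translate_commands_text commands_text mapping (translate_commands_text commands_text mapping)

-- ===== LEMMAS AND PROOFS =====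

-- first-wins setdefault loop computes the first normalized match of the scan
theorem pv_nd_get? (items : List (String × String)) (nd : PySem.Dict String String) (n : String) :
    (items.foldl (fun nd p => nd.setdefault (pvNorm p.1) p.2) nd).get? n
      = match nd.get? n with
        | some v => some v
        | none => items.findSome? (fun p => if pvNorm p.1 = n then some p.2 else none) := by
  induction items generalizing nd with
  | nil => cases h : nd.get? n <;> simp [h]
  | cons p rest ih =>
    simp only [List.foldl_cons, List.findSome?_cons]
    rw [ih]
    by_cases h : pvNorm p.1 = n
    · subst h
      rw [PySem.Dict.get?_setdefault_self]
      cases hnd : nd.get? (pvNorm p.1) <;> simp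
    · rw [PySem.Dict.get?_setdefault_of_ne _ _ (Ne.symm h)]
      simp [h]

theorem pv_line_eq (d : PySem.Dict String String) (raw : String) :
    pvLineA d raw
      = pvLineB d (d.items.foldl (fun nd p => nd.setdefault (pvNorm p.1) p.2) PySem.Dict.empty) raw := by
  unfold pvLineA pvLineB
  by_cases hk : PySem.Str.strip (pvLstripTabSpace raw) = ""
  · simp [hk]
  · simp only [hk, if_false]
    rw [pv_nd_get?]
    rw [PySem.Dict.contains_eq_isSome_get?]
    cases hg : d.get? (PySem.Str.strip (pvLstripTabSpace raw)) <;> simp [PySem.Dict.get?_empty]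

-- ===== VERDICT (by name: the statement is the Claim_ definition above) =====
theorem translate_commands_text_spec : Claim_equal_translate_commands_text := by
  intro commands_text mapping _
  show PySem.Str.join "\n"
      ((PySem.Str.splitlines commands_text).foldl
        (fun out raw => out ++ pvLineA (PySem.Dict.ofList mapping) raw) [])
    = PySem.Str.join "\n"
      ((PySem.Str.splitlines commands_text).flatMap
        (fun raw => pvLineB (PySem.Dict.ofList mapping)
          (((PySem.Dict.ofList mapping).items).foldl
            (fun nd p => nd.setdefault (pvNorm p.1) p.2) PySem.Dict.empty) raw))
  rw [PySem.List.foldl_append_eq_flatMap, List.nil_append]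
  have h : ∀ raw, pvLineA (PySem.Dict.ofList mapping) raw
      = pvLineB (PySem.Dict.ofList mapping)
          (((PySem.Dict.ofList mapping).items).foldl
            (fun nd p => nd.setdefault (pvNorm p.1) p.2) PySem.Dict.empty) raw :=
    fun raw => pv_line_eq _ raw
  exact congrArg (fun f => PySem.Str.join "\n" (List.flatMap f (PySem.Str.splitlines commands_text))) (funext h)
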